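-- pv_equiv track=rewrite | github.com/danreic/performance_mcp | pysrc/jenkins.py | order_data_by_test_name
-- ===== SOURCE A (Python) =====
-- def order_data_by_test_name(data):
--     """
--     Orders the performance data by test name.
--     """
--     keys = list(data.keys())
--     ordered_data = []
--     for key in ["date", "build", "cluster", "uniq"]:
--         if key in keys:
--             ordered_data.append(data.get(key, "-"))
--             keys.remove(key)
--
--     keys.sort()
--     for key in keys:
--         ordered_data.append(data.get(key, "-"))
--     ordered_keys = ["date", "build", "cluster", "uniq"] + keys
--     return ordered_data, ordered_keys
-- ===== SOURCE B (Python) =====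
-- def order_data_by_test_name(data):
--     """
--     Orders the performance data by test name.
--     """
--     priority = ["date", "build", "cluster", "uniq"]
--     pset = set(priority)
--     order = sorted(data.keys(),
--                    key=lambda k: (priority.index(k), "") if k in pset else (4, k))
--     rest = sorted(k for k in data.keys() if k not in pset)
--     return [data.get(k, "-") for k in order], priority + rest
-- ===== Notes on version B (the rewrite author's own statement) =====
-- stated objective: simpler
-- what changed: Replaces A's mutate-and-remove loop over a shrinking key list plus two separate append loops with one sort of all keys under a (priority-rank, name) tuple key and comprehensions, with no list mutation.
import Mathlib
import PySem

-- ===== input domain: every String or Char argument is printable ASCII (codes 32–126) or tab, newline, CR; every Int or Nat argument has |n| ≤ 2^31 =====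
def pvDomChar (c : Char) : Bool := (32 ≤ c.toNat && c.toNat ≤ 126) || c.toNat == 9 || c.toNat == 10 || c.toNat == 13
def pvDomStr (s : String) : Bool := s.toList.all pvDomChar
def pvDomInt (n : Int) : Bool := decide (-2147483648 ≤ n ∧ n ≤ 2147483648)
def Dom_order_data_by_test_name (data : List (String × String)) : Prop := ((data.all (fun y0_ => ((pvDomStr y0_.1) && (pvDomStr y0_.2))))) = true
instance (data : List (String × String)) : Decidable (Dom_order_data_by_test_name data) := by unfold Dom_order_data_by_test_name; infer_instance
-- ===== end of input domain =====

-- B replaces A's mutate-and-remove loop and two append loops by one tuple-key sort of the keys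
-- plus comprehensions (objective: simpler); the return value only is compared (A mutates no argument).


-- ===== PORT A =====
def order_data_by_test_name (data : List (String × String)) : List String × List String :=
  let d := PySem.Dict.mk data
  let keys0 := d.keys
  let st := (["date", "build", "cluster", "uniq"] : List String).foldl
    (fun (s : List String × List String) key =>
      if s.2.contains key then
        (s.1 ++ [d.getD key "-"], (PySem.List.remove? s.2 key).getD s.2)
      else s) (([] : List String), keys0)
  let keys1 := PySem.List.sorted st.2 (fun x => x) false
  let od := keys1.foldl (fun acc key => acc ++ [d.getD key "-"]) st.1
  (od, (["date", "build", "cluster", "uniq"] : List String) ++ keys1)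

-- ===== PORT B =====
def order_data_by_test_name_alt (data : List (String × String)) : List String × List String :=
  let d := PySem.Dict.mk data
  let priority : List String := ["date", "build", "cluster", "uniq"]
  let pset := PySem.Set.ofList priority
  let order := PySem.List.sorted2 d.keys
    (fun k => if pset.contains k then (((PySem.List.index? priority k).getD 0 : Nat) : Int) else 4)
    (fun k => if pset.contains k then "" else k) false
  let rest := PySem.List.sorted (d.keys.filter (fun k => !(pset.contains k))) (fun x => x) false
  (order.map (fun k => d.getD k "-"), priority ++ rest)

-- ===== PRECONDITION & SPEC =====
-- Pre_ excludes association lists with duplicate keys: those do not represent any Python dict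
-- (A's argument is a dict, whose keys are unique), so A's behaviour is undefined there.
def Pre_order_data_by_test_name (data : List (String × String)) : Prop :=
  (data.map Prod.fst).Nodup
instance (data : List (String × String)) : Decidable (Pre_order_data_by_test_name data) := by
  unfold Pre_order_data_by_test_name; infer_instance
def pvWitness_order_data_by_test_name : (List (String × String)) :=
  [("build", "17"), ("zeta", "1.2"), ("alpha", "3")]

def Spec_order_data_by_test_name (data : List (String × String)) (out : List String × List String) : Prop := out = order_data_by_test_name_alt data
instance (data : List (String × String)) (out : List String × List String) : Decidable (Spec_order_data_by_test_name data out) := by unfold Spec_order_data_by_test_name; infer_instance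

-- ===== CLAIM (what is proved, stated in full; the proofs are below) =====
def Claim_equal_order_data_by_test_name : Prop := ∀ (data : List (String × String)), Dom_order_data_by_test_name data → Pre_order_data_by_test_name data → Spec_order_data_by_test_name data (order_data_by_test_name data)

-- ===== LEMMAS AND PROOFS =====

def pvKeyLex (k : String) : Lex (Int × String) :=
  toLex
    ((if (PySem.Set.ofList (["date", "build", "cluster", "uniq"] : List String)).contains k then
        (((PySem.List.index? (["date", "build", "cluster", "uniq"] : List String) k).getD 0 : Nat) : Int) else 4),
     (if (PySem.Set.ofList (["date", "build", "cluster", "uniq"] : List String)).contains k then "" else k))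
theorem pvPairwiseP : List.Pairwise (fun a b => pvKeyLex a < pvKeyLex b) ["date", "build", "cluster", "uniq"] := by decide
theorem pvKeyLex_of_not_mem (x : String) (h : x ∉ (["date", "build", "cluster", "uniq"] : List String)) :
    pvKeyLex x = toLex ((4 : Int), x) := by
  have h' : ¬(x = "date" ∨ x = "build" ∨ x = "cluster" ∨ x = "uniq") := by simpa using h
  simp only [pvKeyLex]
  simp
  constructor <;> intro hc <;> exact absurd hc h'
theorem pvKeyLex_fst_lt (a : String) (ha : a ∈ (["date", "build", "cluster", "uniq"] : List String))
    (b : String) (hb : b ∉ (["date", "build", "cluster", "uniq"] : List String)) :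
    pvKeyLex a < pvKeyLex b := by
  rw [pvKeyLex_of_not_mem b hb]
  have ha' : a = "date" ∨ a = "build" ∨ a = "cluster" ∨ a = "uniq" := by simpa using ha
  have e0 : pvKeyLex "date" = toLex ((0 : Int), "") := by decide
  have e1 : pvKeyLex "build" = toLex ((1 : Int), "") := by decide
  have e2 : pvKeyLex "cluster" = toLex ((2 : Int), "") := by decide
  have e3 : pvKeyLex "uniq" = toLex ((3 : Int), "") := by decide
  rcases ha' with h | h | h | h <;> subst h
  · rw [e0]; exact Prod.Lex.toLex_lt_toLex.mpr (Or.inl (by norm_num))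
  · rw [e1]; exact Prod.Lex.toLex_lt_toLex.mpr (Or.inl (by norm_num))
  · rw [e2]; exact Prod.Lex.toLex_lt_toLex.mpr (Or.inl (by norm_num))
  · rw [e3]; exact Prod.Lex.toLex_lt_toLex.mpr (Or.inl (by norm_num))

theorem sorted_keyLex_eq (K : List String) (hK : K.Nodup) :
    PySem.List.sorted K pvKeyLex false
      = (["date", "build", "cluster", "uniq"] : List String).filter (fun k => decide (k ∈ K))
        ++ PySem.List.sorted (K.filter (fun x => decide (x ∉ (["date", "build", "cluster", "uniq"] : List String)))) (fun x => x) false := by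
  set P : List String := ["date", "build", "cluster", "uniq"] with hPdef
  set rest := K.filter (fun x => decide (x ∉ P)) with hrest
  set srest := PySem.List.sorted rest (fun x => x) false with hsrest
  have hrestnd : rest.Nodup := hK.filter _
  have hsp : srest.Perm rest := PySem.List.sorted_perm _ _ _
  have hsnd : srest.Nodup := hsp.nodup_iff.mpr hrestnd
  have hmem_srest : ∀ x ∈ srest, x ∉ P := by
    intro x hx
    have := hsp.mem_iff.mp hx
    simpa using (List.mem_filter.mp this).2
  have h3 : rest = K.filter (fun x => !decide (x ∈ P)) := by
    simp [hrest, decide_not]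
  have hperm : (P.filter (fun k => decide (k ∈ K)) ++ srest).Perm K := by
    have h1 : (P.filter (fun k => decide (k ∈ K))).Perm (K.filter (fun k => decide (k ∈ P))) := by
      rw [List.perm_ext_iff_of_nodup ((by decide : P.Nodup).filter _) (hK.filter _)]
      intro a
      simp only [List.mem_filter, decide_eq_true_eq]
      tauto
    have h2 : srest.Perm (K.filter (fun x => !decide (x ∈ P))) := h3 ▸ hsp
    exact (List.Perm.append h1 h2).trans (List.filter_append_perm _ K)
  have hpair : (P.filter (fun k => decide (k ∈ K)) ++ srest).Pairwise
      (fun a b => pvKeyLex a < pvKeyLex b) := by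
    rw [List.pairwise_append]
    refine ⟨pvPairwiseP.sublist (List.filter_sublist), ?_, ?_⟩
    · have hle : srest.Pairwise (fun a b => a ≤ b) := by
        simpa [hsrest] using PySem.List.sorted_pairwise rest (fun x => x)
      have hne : srest.Pairwise (fun a b => a ≠ b) := hsnd
      refine (hle.and hne).imp_of_mem ?_
      intro a b ha hb hab
      rw [pvKeyLex_of_not_mem a (hmem_srest a ha), pvKeyLex_of_not_mem b (hmem_srest b hb)]
      exact Prod.Lex.toLex_lt_toLex.mpr (Or.inr ⟨rfl, lt_of_le_of_ne hab.1 hab.2⟩)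
    · intro a ha b hb
      exact pvKeyLex_fst_lt a (List.mem_filter.mp ha).1 b (hmem_srest b hb)
  exact PySem.List.sorted_eq_of_perm_of_pairwise_lt K _ pvKeyLex hperm hpair

theorem loopA_eq (g : String → String) (P : List String) (l acc : List String)
    (hP : P.Nodup) (hl : l.Nodup) :
    P.foldl (fun (s : List String × List String) key =>
      if s.2.contains key then (s.1 ++ [g key], (PySem.List.remove? s.2 key).getD s.2) else s)
      (acc, l)
    = (acc ++ (P.filter (fun k => decide (k ∈ l))).map g,
       P.foldl (fun l k => l.erase k) l) := by
  induction P generalizing l acc with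
  | nil => simp
  | cons k P' ih =>
    have hP' : P'.Nodup := hP.of_cons
    have hkP' : k ∉ P' := (List.nodup_cons.mp hP).1
    rw [List.foldl_cons, List.foldl_cons]
    by_cases hk : k ∈ l
    · have hrem : (PySem.List.remove? l k).getD l = l.erase k := by
        rw [PySem.List.remove?_eq_some_erase _ _ hk]; rfl
      have hfc : P'.filter (fun x => decide (x ∈ l.erase k)) = P'.filter (fun x => decide (x ∈ l)) := by
        apply List.filter_congr
        intro x hx
        have hne : x ≠ k := fun h => hkP' (h ▸ hx)
        simp [List.mem_erase_of_ne hne]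
      rw [show (if (acc, l).2.contains k = true then
            ((acc, l).1 ++ [g k], (PySem.List.remove? (acc, l).2 k).getD (acc, l).2) else (acc, l))
          = (acc ++ [g k], l.erase k) from by simp [hk, hrem]]
      rw [ih (l.erase k) (acc ++ [g k]) hP' (hl.erase k)]
      simp [hfc, hk]
    · rw [show (if (acc, l).2.contains k = true then
            ((acc, l).1 ++ [g k], (PySem.List.remove? (acc, l).2 k).getD (acc, l).2) else (acc, l))
          = (acc, l) from by simp [hk]]
      rw [ih l acc hP' hl]
      simp [hk, List.erase_of_not_mem hk]

theorem foldl_erase_eq_filter (P : List String) (l : List String) (hl : l.Nodup) :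
    P.foldl (fun l k => l.erase k) l = l.filter (fun x => decide (x ∉ P)) := by
  induction P generalizing l with
  | nil => simp
  | cons k P' ih =>
    simp only [List.foldl_cons]
    rw [ih (l.erase k) (hl.erase k), hl.erase_eq_filter]
    rw [List.filter_filter]
    apply List.filter_congr
    intro x hx
    by_cases h1 : x = k <;> by_cases h2 : x ∈ P' <;> simp [h1, h2, bne]

theorem foldl_append_map (g : String → String) (l acc : List String) :
    l.foldl (fun acc key => acc ++ [g key]) acc = acc ++ l.map g := by
  induction l generalizing acc with
  | nil => simp
  | cons x t ih => simp [List.foldl, ih]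

theorem sorted2_eq_sorted_toLex (xs : List String) (k1 : String → Int) (k2 : String → String) :
    PySem.List.sorted2 xs k1 k2 false
      = PySem.List.sorted xs (fun x => toLex (k1 x, k2 x)) false := by
  unfold PySem.List.sorted2 PySem.List.sorted
  simp only [Bool.false_eq_true, if_neg]
  congr 1
  funext acc x
  congr 1
  funext a b
  simp only [Prod.Lex.toLex_lt_toLex]
  by_cases h1 : k1 a < k1 b
  · simp [h1, not_lt.mpr (le_of_lt h1)]
  · by_cases h2 : k1 b < k1 a
    · simp [h1, h2, ne_of_gt h2]
    · have h3 : k1 a = k1 b := le_antisymm (not_lt.mp h2) (not_lt.mp h1)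
      simp [h3]

-- ===== VERDICT (by name: the statement is the Claim_ definition above) =====
theorem order_data_by_test_name_spec : Claim_equal_order_data_by_test_name := by
  intro data hdom hpre
  unfold Spec_order_data_by_test_name
  have hK : (PySem.Dict.mk data).keys.Nodup := hpre
  simp only [order_data_by_test_name, order_data_by_test_name_alt]
  rw [loopA_eq (fun key => (PySem.Dict.mk data).getD key "-") _ _ _ (by decide) hK]
  rw [foldl_erase_eq_filter _ _ hK]
  rw [sorted2_eq_sorted_toLex]
  rw [show (fun x => toLex
        ((if (PySem.Set.ofList (["date", "build", "cluster", "uniq"] : List String)).contains x then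
            (((PySem.List.index? (["date", "build", "cluster", "uniq"] : List String) x).getD 0 : Nat) : Int) else 4),
         (if (PySem.Set.ofList (["date", "build", "cluster", "uniq"] : List String)).contains x then "" else x)))
      = pvKeyLex from rfl]
  rw [sorted_keyLex_eq _ hK]
  have hpred : ((PySem.Dict.mk data).keys.filter
        (fun k => !((PySem.Set.ofList (["date", "build", "cluster", "uniq"] : List String)).contains k)))
      = ((PySem.Dict.mk data).keys.filter
        (fun x => decide (x ∉ (["date", "build", "cluster", "uniq"] : List String)))) := by
    apply List.filter_congr
    intro x _
    rcases Decidable.em (x ∈ (["date", "build", "cluster", "uniq"] : List String)) with h | h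
    · have hc : (PySem.Set.ofList (["date", "build", "cluster", "uniq"] : List String)).contains x = true := by
        rw [PySem.Set.contains_eq_listContains]
        exact List.contains_iff_mem.mpr ((PySem.Set.mem_ofList _ _).mpr h)
      simp [hc, h]
    · have hc : (PySem.Set.ofList (["date", "build", "cluster", "uniq"] : List String)).contains x = false := by
        rw [PySem.Set.contains_eq_listContains, List.contains_eq_mem]
        exact decide_eq_false (fun hm => h ((PySem.Set.mem_ofList _ _).mp hm))
      simp [hc, h]
  rw [hpred]
  rw [foldl_append_map]
  simp [List.map_append]
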